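-- pv_equiv track=rewrite | github.com/WalkingLight/Expert-System | main.py | update_facts
-- ===== SOURCE A (Python) =====
-- def update_facts(f, v_list):
--     no_i = 0
--     for line in f:
--         for char in line:
--             if char == "!":
--                 no_i = 1
--             if char.isalpha() and no_i == 0:
--                 v_list[char] = True
--             if char.isalpha() and no_i == 1:
--                 v_list[char] = False
--     return v_list
-- ===== SOURCE B (Python) =====
-- def update_facts(f, v_list):
--     s = "".join(f)
--     i = s.find("!")
--     if i == -1:
--         for ch in s:
--             if ch.isalpha():
--                 v_list[ch] = True
--     else:
--         for ch in s[:i]: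
--             if ch.isalpha():
--                 v_list[ch] = True
--         for ch in s[i:]:
--             if ch.isalpha():
--                 v_list[ch] = False
--     return v_list
-- ===== Notes on version B (the rewrite author's own statement) =====
-- stated objective: simpler
-- what changed: Instead of threading a no_i flag through a nested per-line/per-char loop, B joins the lines, locates the first '!' with str.find, and does straight-line passes: all alpha chars before it set True, all from it on set False.
import Mathlib
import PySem

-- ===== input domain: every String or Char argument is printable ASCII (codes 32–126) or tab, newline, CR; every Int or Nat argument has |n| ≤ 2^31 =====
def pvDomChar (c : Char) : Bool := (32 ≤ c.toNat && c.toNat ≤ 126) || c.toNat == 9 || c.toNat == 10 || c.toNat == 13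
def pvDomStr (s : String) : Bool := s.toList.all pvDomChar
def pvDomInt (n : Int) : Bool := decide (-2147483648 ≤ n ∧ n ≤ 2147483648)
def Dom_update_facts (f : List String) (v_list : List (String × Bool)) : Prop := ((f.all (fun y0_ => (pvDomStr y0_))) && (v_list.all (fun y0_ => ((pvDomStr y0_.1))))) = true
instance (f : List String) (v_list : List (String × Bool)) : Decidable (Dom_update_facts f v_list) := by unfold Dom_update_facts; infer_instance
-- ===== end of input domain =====

-- B replaces A's no_i flag threaded through a nested loop by: join the lines, find the first '!',
-- set alpha chars before it True and from it on False. Same return value; A mutates v_list in place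
-- (the equivalence proved here is about the return value).

-- ===== PORT A =====
-- one character step of A's inner loop: state = (no_i, dict)
def pvStepA (st : Int × PySem.Dict String Bool) (c : Char) : Int × PySem.Dict String Bool :=
  let no_i : Int := if c == '!' then 1 else st.1
  let d := if PySem.Chars.isalpha c && no_i == 0 then st.2.insert (String.ofList [c]) true else st.2
  let d := if PySem.Chars.isalpha c && no_i == 1 then d.insert (String.ofList [c]) false else d
  (no_i, d)

def update_facts (f : List String) (v_list : List (String × Bool)) : List (String × Bool) :=
  (f.foldl (fun st line => line.toList.foldl pvStepA st) ((0 : Int), PySem.Dict.ofList v_list)).2.items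

-- ===== PORT B =====
-- one of B's plain loops: set every alphabetic char of cs to b
def pvSet (b : Bool) (cs : List Char) (d : PySem.Dict String Bool) : PySem.Dict String Bool :=
  cs.foldl (fun d c => if PySem.Chars.isalpha c then d.insert (String.ofList [c]) b else d) d

def update_facts_alt (f : List String) (v_list : List (String × Bool)) : List (String × Bool) :=
  let d := PySem.Dict.ofList v_list
  let s := (PySem.Str.join "" f).toList
  let i := PySem.Chars.find s ['!']
  -- s[:i] / s[i:] with 0 ≤ i are exactly take/drop i.toNat
  (if i = -1 then pvSet true s d
   else pvSet false (s.drop i.toNat) (pvSet true (s.take i.toNat) d)).items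

-- ===== PRECONDITION & SPEC =====
def Spec_update_facts (f : List String) (v_list : List (String × Bool)) (out : List (String × Bool)) : Prop := out = update_facts_alt f v_list
instance (f : List String) (v_list : List (String × Bool)) (out : List (String × Bool)) : Decidable (Spec_update_facts f v_list out) := by unfold Spec_update_facts; infer_instance

-- ===== CLAIM (what is proved, stated in full; the proofs are below) =====
def Claim_equal_update_facts : Prop := ∀ (f : List String) (v_list : List (String × Bool)), Dom_update_facts f v_list → Spec_update_facts f v_list (update_facts f v_list)

-- ===== LEMMAS AND PROOFS =====

-- nested per-line fold = fold over the flattened character list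
theorem foldA_flatten (f : List String) (st : Int × PySem.Dict String Bool) :
    f.foldl (fun st line => line.toList.foldl pvStepA st) st
      = ((f.map String.toList).flatten).foldl pvStepA st := by
  induction f generalizing st with
  | nil => rfl
  | cons a t ih => simp [List.foldl_append, ih]

theorem join_empty_eq_flatten (xs : List (List Char)) :
    PySem.Chars.join [] xs = xs.flatten := by
  match xs with
  | [] => simp [PySem.Chars.join_nil]
  | [a] => simp [PySem.Chars.join_singleton]
  | a :: b :: t =>
    rw [PySem.Chars.join_cons_cons, join_empty_eq_flatten (b :: t)]
    simp

theorem foldA_one (s : List Char) (d : PySem.Dict String Bool) :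
    s.foldl pvStepA (1, d) = (1, pvSet false s d) := by
  induction s generalizing d with
  | nil => rfl
  | cons c t ih =>
    simp only [List.foldl_cons, pvSet]
    rw [show pvStepA (1, d) c
        = (1, if PySem.Chars.isalpha c then d.insert (String.ofList [c]) false else d) by
      simp [pvStepA]]
    exact ih _

theorem foldA_zero_no_bang (s : List Char) (d : PySem.Dict String Bool) (h : '!' ∉ s) :
    s.foldl pvStepA (0, d) = (0, pvSet true s d) := by
  induction s generalizing d with
  | nil => rfl
  | cons c t ih =>
    simp only [List.mem_cons, not_or] at h
    simp only [List.foldl_cons, pvSet]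
    have hc : c ≠ '!' := fun e => h.1 e.symm
    rw [show pvStepA (0, d) c
        = (0, if PySem.Chars.isalpha c then d.insert (String.ofList [c]) true else d) by
      by_cases ha : PySem.Chars.isalpha c = true <;> simp [pvStepA, hc, ha]]
    exact ih _ h.2

theorem bang_infix_iff (s : List Char) : ['!'] <:+: s ↔ '!' ∈ s := by
  constructor
  · intro h; exact h.mem (by simp)
  · intro h
    obtain ⟨t1, t2, rfl⟩ := List.append_of_mem h
    exact ⟨t1, t2, by simp⟩

theorem mem_take_drop_prefix (s : List Char) (k : Nat) (h : '!' ∈ s.take k) :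
    ∃ j < k, ['!'] <+: s.drop j := by
  obtain ⟨j, hj, hget⟩ := List.getElem_of_mem h
  have hjk : j < k := lt_of_lt_of_le hj (by simp)
  have hjs : j < s.length := lt_of_lt_of_le hj (by simp)
  refine ⟨j, hjk, ?_⟩
  rw [List.getElem_take] at hget
  rw [List.drop_eq_getElem_cons hjs, hget]
  exact ⟨s.drop (j + 1), rfl⟩

-- the key single-string lemma: A's flag-threaded fold equals B's split at the first '!'
theorem foldA_main (s : List Char) (d : PySem.Dict String Bool) :
    (s.foldl pvStepA (0, d)).2
      = (if PySem.Chars.find s ['!'] = -1 then pvSet true s d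
         else pvSet false (s.drop (PySem.Chars.find s ['!']).toNat)
              (pvSet true (s.take (PySem.Chars.find s ['!']).toNat) d)) := by
  by_cases hfind : PySem.Chars.find s ['!'] = -1
  · rw [if_pos hfind]
    have hnm : '!' ∉ s := by
      intro hm
      exact (PySem.Chars.find_eq_neg_one_iff s ['!']).mp hfind ((bang_infix_iff s).mpr hm)
    rw [foldA_zero_no_bang s d hnm]
  · rw [if_neg hfind]
    have hpos : 0 ≤ PySem.Chars.find s ['!'] := by
      have := PySem.Chars.neg_one_le_find (s := s) (sub := ['!'])
      omega
    obtain ⟨hpre, hmin⟩ := PySem.Chars.find_spec (s := s) (sub := ['!']) hpos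
    set k := (PySem.Chars.find s ['!']).toNat with hk
    obtain ⟨rest, hdrop⟩ : ∃ rest, s.drop k = '!' :: rest := by
      obtain ⟨t, ht⟩ := hpre
      exact ⟨t, by simp_all⟩
    have hnt : '!' ∉ s.take k := by
      intro hm
      obtain ⟨j, hj, hpj⟩ := mem_take_drop_prefix s k hm
      exact hmin j hj hpj
    calc (s.foldl pvStepA (0, d)).2
        = ((s.take k ++ s.drop k).foldl pvStepA (0, d)).2 := by rw [List.take_append_drop]
      _ = ((s.drop k).foldl pvStepA (0, pvSet true (s.take k) d)).2 := by
          rw [List.foldl_append, foldA_zero_no_bang _ _ hnt]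
      _ = pvSet false (s.drop k) (pvSet true (s.take k) d) := by
          have hb : PySem.Chars.isalpha '!' = false := by decide
          rw [hdrop]
          simp only [List.foldl_cons]
          rw [show pvStepA (0, pvSet true (s.take k) d) '!' = (1, pvSet true (s.take k) d) by
            simp [pvStepA, hb]]
          rw [foldA_one]
          simp [pvSet, hb]

-- ===== VERDICT (by name: the statement is the Claim_ definition above) =====
theorem update_facts_spec : Claim_equal_update_facts := by
  intro f v_list _
  unfold Spec_update_facts update_facts update_facts_alt
  rw [foldA_flatten]
  rw [show (PySem.Str.join "" f).toList = (f.map String.toList).flatten by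
    rw [PySem.Str.toList_join]; exact join_empty_eq_flatten _]
  exact congrArg PySem.Dict.items (foldA_main _ _)
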